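-- pv_equiv track=rewrite | github.com/sleevefishcode/ScalableTUL | ScaleTUL_code/preprocess.py | merge_daily_to_weekly
-- ===== SOURCE A (Python) =====
-- def merge_daily_to_weekly(user_traj,train_nums):
--     weekly_traj = []
--     week_traj, week_time, week_category = [], [], []
--     week_idx = 0
--
--     for day_traj, day_time, day_category, _ in user_traj:
--         week_traj.extend(day_traj)
--         week_time.extend(day_time)
--         week_category.extend(day_category)
--
--
--         if len(week_traj) >= 7:
--             weekly_traj.append((week_traj, week_time, week_category, week_idx))
--             train_nums += 1
--             week_traj, week_time, week_category = [], [], []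
--             week_idx += 1
--
--     if week_traj:
--         weekly_traj.append((week_traj, week_time, week_category, week_idx))
--         train_nums += 1
--
--     return weekly_traj,train_nums
-- ===== SOURCE B (Python) =====
-- def merge_daily_to_weekly(user_traj, train_nums):
--     # pass 1: partition days into groups, closing a group once it holds >= 7 entries
--     groups, cur, cnt = [], [], 0
--     for day in user_traj:
--         cur.append(day)
--         cnt += len(day[0])
--         if cnt >= 7:
--             groups.append(cur)
--             cur, cnt = [], 0
--     if cnt > 0:
--         groups.append(cur)
--     # pass 2: merge each group into one weekly tuple tagged with its index
--     weekly_traj = [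
--         ([x for d, _, _, _ in g for x in d],
--          [x for _, t, _, _ in g for x in t],
--          [x for _, _, c, _ in g for x in c],
--          idx)
--         for idx, g in enumerate(groups)
--     ]
--     return weekly_traj, train_nums + len(groups)
-- ===== Notes on version B (the rewrite author's own statement) =====
-- stated objective: alternative
-- what changed: Replaces A's single gated accumulate-and-flush loop (which concatenates day lists as it goes) with a partition pass that only counts entries and groups whole days, followed by a merge pass that concatenates each group and assigns week indices by enumeration.
import Mathlib
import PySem

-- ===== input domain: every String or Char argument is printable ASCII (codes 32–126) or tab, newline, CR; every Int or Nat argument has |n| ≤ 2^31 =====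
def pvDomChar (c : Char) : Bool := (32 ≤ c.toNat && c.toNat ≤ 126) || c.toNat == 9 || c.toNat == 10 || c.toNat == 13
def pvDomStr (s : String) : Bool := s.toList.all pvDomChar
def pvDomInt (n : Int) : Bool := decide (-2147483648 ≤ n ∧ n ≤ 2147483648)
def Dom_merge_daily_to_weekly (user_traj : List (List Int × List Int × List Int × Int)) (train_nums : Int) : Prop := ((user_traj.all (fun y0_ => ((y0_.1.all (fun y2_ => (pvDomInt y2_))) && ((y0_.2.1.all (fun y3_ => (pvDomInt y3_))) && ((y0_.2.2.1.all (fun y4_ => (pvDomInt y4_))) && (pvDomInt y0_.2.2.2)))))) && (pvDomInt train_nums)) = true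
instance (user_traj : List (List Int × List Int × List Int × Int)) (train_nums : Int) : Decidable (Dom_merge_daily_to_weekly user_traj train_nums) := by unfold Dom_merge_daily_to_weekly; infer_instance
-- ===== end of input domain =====

-- B replaces A's gated accumulate-and-flush loop by a partition pass (group whole days,
-- counting entries) followed by a merge pass over the enumerated groups; alternative
-- decomposition, same cost.

-- ===== PORT A =====
-- loop body of A's for-loop; state = (weekly_traj, week_traj, week_time, week_category, week_idx, train_nums)
def pvAStep (st : List (List Int × List Int × List Int × Int) × List Int × List Int × List Int × Int × Int)
    (day : List Int × List Int × List Int × Int) :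
    List (List Int × List Int × List Int × Int) × List Int × List Int × List Int × Int × Int :=
  let (weekly, wt, wtime, wc, idx, tn) := st
  let wt := wt ++ day.1
  let wtime := wtime ++ day.2.1
  let wc := wc ++ day.2.2.1
  if wt.length ≥ 7 then (weekly ++ [(wt, wtime, wc, idx)], [], [], [], idx + 1, tn + 1)
  else (weekly, wt, wtime, wc, idx, tn)

def merge_daily_to_weekly (user_traj : List (List Int × List Int × List Int × Int)) (train_nums : Int) : (List (List Int × List Int × List Int × Int)) × Int :=
  let st := user_traj.foldl pvAStep ([], [], [], [], 0, train_nums)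
  let (weekly, wt, wtime, wc, idx, tn) := st
  if wt ≠ [] then (weekly ++ [(wt, wtime, wc, idx)], tn + 1) else (weekly, tn)

-- ===== PORT B =====
-- partition-pass loop body; state = (groups, cur, cnt)
def pvBStep (st : List (List (List Int × List Int × List Int × Int)) × List (List Int × List Int × List Int × Int) × Int)
    (day : List Int × List Int × List Int × Int) :
    List (List (List Int × List Int × List Int × Int)) × List (List Int × List Int × List Int × Int) × Int :=
  let (groups, cur, cnt) := st
  let cur := cur ++ [day]
  let cnt := cnt + (day.1.length : Int)
  if cnt ≥ 7 then (groups ++ [cur], [], 0) else (groups, cur, cnt)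

-- merge one group into a weekly tuple (the three comprehensions of Source B)
def pvMergeGroup (g : List (List Int × List Int × List Int × Int)) (idx : Int) :
    List Int × List Int × List Int × Int :=
  (g.flatMap (fun d => d.1), g.flatMap (fun d => d.2.1), g.flatMap (fun d => d.2.2.1), idx)

def merge_daily_to_weekly_alt (user_traj : List (List Int × List Int × List Int × Int)) (train_nums : Int) : (List (List Int × List Int × List Int × Int)) × Int :=
  let st := user_traj.foldl pvBStep ([], [], 0)
  let (groups, cur, cnt) := st
  let groups := if cnt > 0 then groups ++ [cur] else groups
  ((PySem.List.enumerate groups 0).map (fun p => pvMergeGroup p.2 p.1),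
   train_nums + groups.length)

-- ===== PRECONDITION & SPEC =====
def Spec_merge_daily_to_weekly (user_traj : List (List Int × List Int × List Int × Int)) (train_nums : Int) (out : (List (List Int × List Int × List Int × Int)) × Int) : Prop := out = merge_daily_to_weekly_alt user_traj train_nums
instance (user_traj : List (List Int × List Int × List Int × Int)) (train_nums : Int) (out : (List (List Int × List Int × List Int × Int)) × Int) : Decidable (Spec_merge_daily_to_weekly user_traj train_nums out) := by unfold Spec_merge_daily_to_weekly; infer_instance

-- ===== CLAIM (what is proved, stated in full; the proofs are below) =====
def Claim_equal_merge_daily_to_weekly : Prop := ∀ (user_traj : List (List Int × List Int × List Int × Int)) (train_nums : Int), Dom_merge_daily_to_weekly user_traj train_nums → Spec_merge_daily_to_weekly user_traj train_nums (merge_daily_to_weekly user_traj train_nums)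

-- ===== LEMMAS AND PROOFS =====
def pvF1 (g : List (List Int × List Int × List Int × Int)) : List Int := g.flatMap (fun d => d.1)
def pvF2 (g : List (List Int × List Int × List Int × Int)) : List Int := g.flatMap (fun d => d.2.1)
def pvF3 (g : List (List Int × List Int × List Int × Int)) : List Int := g.flatMap (fun d => d.2.2.1)
def pvMergeG (groups : List (List (List Int × List Int × List Int × Int))) :
    List (List Int × List Int × List Int × Int) :=
  (PySem.List.enumerate groups 0).map (fun p => pvMergeGroup p.2 p.1)

lemma pvMergeG_append (groups : List (List (List Int × List Int × List Int × Int)))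
    (g : List (List Int × List Int × List Int × Int)) :
    pvMergeG (groups ++ [g]) = pvMergeG groups ++ [(pvF1 g, pvF2 g, pvF3 g, (groups.length : Int))] := by
  simp [pvMergeG, PySem.List.enumerate_append, PySem.List.enumerate_cons, pvMergeGroup, pvF1, pvF2, pvF3]

lemma pv_loop (rest : List (List Int × List Int × List Int × Int)) :
    ∀ (groups : List (List (List Int × List Int × List Int × Int)))
      (cur : List (List Int × List Int × List Int × Int)) (tn : Int),
    rest.foldl pvAStep (pvMergeG groups, pvF1 cur, pvF2 cur, pvF3 cur, (groups.length : Int), tn + groups.length)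
      = (fun r => (pvMergeG r.1, pvF1 r.2.1, pvF2 r.2.1, pvF3 r.2.1, ((r.1.length : Int)), tn + r.1.length))
          (rest.foldl pvBStep (groups, cur, ((pvF1 cur).length : Int)))
    ∧ (rest.foldl pvBStep (groups, cur, ((pvF1 cur).length : Int))).2.2
      = (((pvF1 (rest.foldl pvBStep (groups, cur, ((pvF1 cur).length : Int))).2.1).length : Int)) := by
  induction rest with
  | nil => intro groups cur tn; exact ⟨rfl, rfl⟩
  | cons day rest ih =>
    intro groups cur tn
    simp only [List.foldl_cons, pvAStep, pvBStep]
    have hf1 : pvF1 (cur ++ [day]) = pvF1 cur ++ day.1 := by simp [pvF1]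
    have hf2 : pvF2 (cur ++ [day]) = pvF2 cur ++ day.2.1 := by simp [pvF2]
    have hf3 : pvF3 (cur ++ [day]) = pvF3 cur ++ day.2.2.1 := by simp [pvF3]
    have hc : (((pvF1 cur).length : Int) + (day.1.length : Int) ≥ 7) ↔ ((pvF1 cur ++ day.1).length ≥ 7) := by
      simp [List.length_append]; omega
    by_cases h : (pvF1 cur ++ day.1).length ≥ 7
    · rw [if_pos h, if_pos (hc.mpr h)]
      have h0 : ([] : List Int) = pvF1 [] := rfl
      have h0' : ((0 : Int)) = ((pvF1 ([] : List (List Int × List Int × List Int × Int))).length : Int) := rfl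
      have hs : (pvMergeG groups ++ [(pvF1 cur ++ day.1, pvF2 cur ++ day.2.1, pvF3 cur ++ day.2.2.1, (groups.length : Int))],
                 ([] : List Int), ([] : List Int), ([] : List Int), (groups.length : Int) + 1, tn + groups.length + 1)
          = (pvMergeG (groups ++ [cur ++ [day]]), pvF1 [], pvF2 [], pvF3 [],
             (((groups ++ [cur ++ [day]]).length : Int)), tn + ((groups ++ [cur ++ [day]]).length : Int)) := by
        rw [pvMergeG_append, hf1, hf2, hf3]
        simp [pvF1, pvF2, pvF3]
        ring
      rw [hs, h0']
      exact ih (groups ++ [cur ++ [day]]) [] tn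
    · rw [if_neg h, if_neg (fun hh => h (hc.mp hh))]
      have hs : (pvMergeG groups, pvF1 cur ++ day.1, pvF2 cur ++ day.2.1, pvF3 cur ++ day.2.2.1, (groups.length : Int), tn + groups.length)
          = (pvMergeG groups, pvF1 (cur ++ [day]), pvF2 (cur ++ [day]), pvF3 (cur ++ [day]), (groups.length : Int), tn + groups.length) := by
        rw [hf1, hf2, hf3]
      have hcnt : ((pvF1 cur).length : Int) + (day.1.length : Int) = ((pvF1 (cur ++ [day])).length : Int) := by
        rw [hf1]; push_cast [List.length_append]; ring
      rw [hs, hcnt]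
      exact ih groups (cur ++ [day]) tn

-- ===== VERDICT (by name: the statement is the Claim_ definition above) =====
lemma pvF1_nil : pvF1 [] = [] := rfl
lemma pvF2_nil : pvF2 [] = [] := rfl
lemma pvF3_nil : pvF3 [] = [] := rfl
lemma pvMergeG_nil : pvMergeG [] = [] := rfl

theorem merge_daily_to_weekly_spec : Claim_equal_merge_daily_to_weekly := by
  intro user_traj train_nums _
  unfold Spec_merge_daily_to_weekly merge_daily_to_weekly merge_daily_to_weekly_alt
  obtain ⟨h1, h2⟩ := pv_loop user_traj [] [] train_nums
  simp only [pvF1_nil, pvF2_nil, pvF3_nil, pvMergeG_nil, List.length_nil, Nat.cast_zero,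
    add_zero] at h1 h2
  set r := user_traj.foldl pvBStep ([], [], 0) with hr
  obtain ⟨g, c, cnt⟩ := r
  rw [h1]
  simp only at h2 ⊢
  by_cases hne : pvF1 c = []
  · have hcz : ¬ cnt > 0 := by rw [h2, hne]; simp
    rw [if_neg (by simp [hne]), if_neg hcz]
    simp [pvMergeG]
  · have hcz : cnt > 0 := by
      rw [h2]; simp only [gt_iff_lt]
      have : (pvF1 c).length ≠ 0 := by simpa using hne
      omega
    rw [if_pos (by simp [hne]), if_pos hcz]
    have hm : (List.map (fun p => pvMergeGroup p.2 p.1) (PySem.List.enumerate (g ++ [c]) 0)) = pvMergeG (g ++ [c]) := rfl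
    rw [hm, pvMergeG_append]
    simp [List.length_append]
    ring
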